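-- pv_equiv track=rewrite | github.com/slimeyayush/deploy | sol.py | max_common_subsequence_length
-- ===== SOURCE A (Python) =====
-- def max_common_subsequence_length(S1, S2, K):
--     len_s1, len_s2 = len(S1), len(S2)
--
--     # Initialize a 2D table to store the length of the common subsequence
--     dp = [[0] * (len_s2 + 1) for _ in range(len_s1 + 1)]
--
--     # Fill the table using dynamic programming
--     for i in range(1, len_s1 + 1):
--         for j in range(1, len_s2 + 1):
--             if abs(ord(S1[i - 1]) - ord(S2[j - 1])) <= K:
--                 dp[i][j] = dp[i - 1][j - 1] + 1
--             dp[i][j] = max(dp[i][j], dp[i - 1][j], dp[i][j - 1])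
--
--     return dp[len_s1][len_s2]
-- ===== SOURCE B (Python) =====
-- def max_common_subsequence_length(S1, S2, K):
--     # Hunt-Szymanski-style thresholds: th[k-1] = smallest j (1-based) such that the
--     # prefix of S1 processed so far and S2[:j] have a near-match common subsequence
--     # of length k.  The answer is the final number of thresholds; no DP table/row.
--     o2 = [ord(c) for c in S2]
--     m = len(o2)
--     th = []
--     for c in S1:
--         a = ord(c)
--         new = []
--         lo = 0
--         for hi in th:
--             for j in range(lo + 1, hi):
--                 if -K <= a - o2[j - 1] <= K:
--                     new.append(j)
--                     break
--             else:
--                 new.append(hi)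
--             lo = hi
--         for j in range(lo + 1, m + 1):
--             if -K <= a - o2[j - 1] <= K:
--                 new.append(j)
--                 break
--         th = new
--     return len(th)
-- ===== Notes on version B (the rewrite author's own statement) =====
-- stated objective: faster
-- what changed: Replaces the full 2D DP table with a Hunt-Szymanski-style thresholds algorithm: it maintains only the list of minimal S2 end positions th[k] for each common-subsequence length k, updating each entry by an early-breaking scan of the interval between consecutive old thresholds; the answer is the final length of that list and no DP cell values are ever stored.
import Mathlib
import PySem

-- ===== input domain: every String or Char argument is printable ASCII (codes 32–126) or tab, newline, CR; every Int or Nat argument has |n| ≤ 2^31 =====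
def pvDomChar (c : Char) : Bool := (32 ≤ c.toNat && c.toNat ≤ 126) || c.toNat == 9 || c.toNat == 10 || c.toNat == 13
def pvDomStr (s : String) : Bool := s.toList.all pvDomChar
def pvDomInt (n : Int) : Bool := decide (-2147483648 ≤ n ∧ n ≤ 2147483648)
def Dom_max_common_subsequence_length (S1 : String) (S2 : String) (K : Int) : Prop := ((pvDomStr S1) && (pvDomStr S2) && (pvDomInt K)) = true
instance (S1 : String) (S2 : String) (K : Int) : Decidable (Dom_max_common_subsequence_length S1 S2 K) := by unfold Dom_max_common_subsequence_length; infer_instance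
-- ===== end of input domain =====

-- B replaces A's full 2D DP table by a Hunt–Szymanski-style thresholds list (minimal S2 end
-- positions per subsequence length, updated by early-breaking interval scans); measured faster.


-- ===== PORT A =====
-- string indexing S1[i-1] is ported as list-of-chars indexing on S1.toList (always in range here)
def max_common_subsequence_length (S1 : String) (S2 : String) (K : Int) : Int :=
  let s1 := S1.toList
  let s2 := S2.toList
  let len_s1 : Int := (s1.length : Int)
  let len_s2 : Int := (s2.length : Int)
  -- dp = [[0] * (len_s2 + 1) for _ in range(len_s1 + 1)]
  let dp0 : List (List Int) :=
    (PySem.List.pyRange 0 (len_s1 + 1) 1).map (fun _ => List.replicate (len_s2 + 1).toNat 0)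
  let dp :=
    (PySem.List.pyRange 1 (len_s1 + 1) 1).foldl (fun dp i =>
      (PySem.List.pyRange 1 (len_s2 + 1) 1).foldl (fun dp j =>
        let c1 := PySem.List.pyGetD s1 (i - 1) ' '
        let c2 := PySem.List.pyGetD s2 (j - 1) ' '
        let row_im1 := PySem.List.pyGetD dp (i - 1) []
        let row_i := PySem.List.pyGetD dp i []
        -- if |ord(S1[i-1]) - ord(S2[j-1])| <= K: dp[i][j] = dp[i-1][j-1] + 1   (else dp[i][j] keeps its value)
        let v0 : Int :=
          if |(c1.toNat : Int) - (c2.toNat : Int)| ≤ K then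
            PySem.List.pyGetD row_im1 (j - 1) 0 + 1
          else PySem.List.pyGetD row_i j 0
        -- dp[i][j] = max(dp[i][j], dp[i-1][j], dp[i][j-1])
        let v := max (max v0 (PySem.List.pyGetD row_im1 j 0)) (PySem.List.pyGetD row_i (j - 1) 0)
        PySem.List.pySetD dp i (PySem.List.pySetD row_i j v)
      ) dp
    ) dp0
  PySem.List.pyGetD (PySem.List.pyGetD dp len_s1 []) len_s2 0

-- ===== PORT B =====
-- thresholds algorithm: th[k] = smallest 1-based j with a length-(k+1) near-match common
-- subsequence of the processed prefix of S1 and S2[:j]; the 'for…break/else' scans are find?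
def max_common_subsequence_length_alt (S1 : String) (S2 : String) (K : Int) : Int :=
  let o2 : List Int := S2.toList.map (fun c => (c.toNat : Int))
  let m : Nat := o2.length
  let th : List Int := S1.toList.foldl (fun th c =>
    let a : Int := (c.toNat : Int)
    let st := th.foldl (fun (st : List Int × Int) hi =>
        let found := (PySem.List.pyRange (st.2 + 1) hi 1).find?
          (fun j => decide (-K ≤ a - PySem.List.pyGetD o2 (j - 1) 0 ∧ a - PySem.List.pyGetD o2 (j - 1) 0 ≤ K))
        (st.1 ++ [found.getD hi], hi)) (([] : List Int), (0 : Int))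
    match (PySem.List.pyRange (st.2 + 1) ((m : Int) + 1) 1).find?
        (fun j => decide (-K ≤ a - PySem.List.pyGetD o2 (j - 1) 0 ∧ a - PySem.List.pyGetD o2 (j - 1) 0 ≤ K)) with
    | some j => st.1 ++ [j]
    | none => st.1) []
  (th.length : Int)

-- ===== PRECONDITION & SPEC =====
def Spec_max_common_subsequence_length (S1 : String) (S2 : String) (K : Int) (out : Int) : Prop := out = max_common_subsequence_length_alt S1 S2 K
instance (S1 : String) (S2 : String) (K : Int) (out : Int) : Decidable (Spec_max_common_subsequence_length S1 S2 K out) := by unfold Spec_max_common_subsequence_length; infer_instance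

-- ===== CLAIM (what is proved, stated in full; the proofs are below) =====
def Claim_equal_max_common_subsequence_length : Prop := ∀ (S1 : String) (S2 : String) (K : Int), Dom_max_common_subsequence_length S1 S2 K → Spec_max_common_subsequence_length S1 S2 K (max_common_subsequence_length S1 S2 K)

-- ===== LEMMAS AND PROOFS =====

-- canonical row builder: the new DP row A computes in one sweep, left to right
def rowGo (K a : Int) (prev : List Int) : Int → Nat → List Int → List Int
  | _, _, [] => []
  | left, j, b :: bs =>
    let pj := prev.getD j 0
    let v0 := if pj > left then pj else left
    let v := if -K ≤ a - b ∧ a - b ≤ K then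
               (let d := prev.getD (j - 1) 0 + 1
                if d > v0 then d else v0)
             else v0
    v :: rowGo K a prev v (j + 1) bs

def rowStep (K a : Int) (o2 prev : List Int) : List Int := 0 :: rowGo K a prev 0 1 o2

theorem rowGo_length (K a : Int) (prev : List Int) (left : Int) (j : Nat) (bs : List Int) :
    (rowGo K a prev left j bs).length = bs.length := by
  induction bs generalizing left j with
  | nil => simp [rowGo]
  | cons b bs ih => simp [rowGo, ih]

theorem getD_nonneg (l : List Int) (h : ∀ x ∈ l, 0 ≤ x) (j : Nat) : 0 ≤ l.getD j 0 := by
  rcases lt_or_ge j l.length with hj | hj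
  · rw [List.getD_eq_getElem l 0 hj]; exact h _ (List.getElem_mem hj)
  · rw [List.getD_eq_default _ _ hj]

theorem rowGo_nonneg (K a : Int) (prev : List Int) (hp : ∀ x ∈ prev, 0 ≤ x) :
    ∀ (bs : List Int) (left : Int) (j : Nat), 0 ≤ left → ∀ x ∈ rowGo K a prev left j bs, 0 ≤ x := by
  intro bs
  induction bs with
  | nil => intro left j _ x hx; simp [rowGo] at hx
  | cons b bs ih =>
    intro left j hl x hx
    have hpj : 0 ≤ prev.getD j 0 := getD_nonneg prev hp j
    simp only [rowGo, List.mem_cons] at hx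
    have hv0 : 0 ≤ (if prev.getD j 0 > left then prev.getD j 0 else left) := by
      split_ifs <;> omega
    have hv : 0 ≤ (if -K ≤ a - b ∧ a - b ≤ K then
        (let d := prev.getD (j - 1) 0 + 1
         if d > (if prev.getD j 0 > left then prev.getD j 0 else left) then d
         else (if prev.getD j 0 > left then prev.getD j 0 else left))
      else (if prev.getD j 0 > left then prev.getD j 0 else left)) := by
      dsimp only; split_ifs <;> omega
    rcases hx with h | h
    · exact h ▸ hv
    · exact ih _ _ hv _ h

-- proof-side name for A's inner loop body (identical term to the port's lambda)
def ainner (K : Int) (s1 s2 : List Char) (ii : Int) (dp : List (List Int)) (lo : Int) : List (List Int) :=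
  (PySem.List.pyRange lo ((s2.length : Int) + 1) 1).foldl (fun dp j =>
    let c1 := PySem.List.pyGetD s1 (ii - 1) ' '
    let c2 := PySem.List.pyGetD s2 (j - 1) ' '
    let row_im1 := PySem.List.pyGetD dp (ii - 1) []
    let row_i := PySem.List.pyGetD dp ii []
    let v0 : Int :=
      if |(c1.toNat : Int) - (c2.toNat : Int)| ≤ K then
        PySem.List.pyGetD row_im1 (j - 1) 0 + 1
      else PySem.List.pyGetD row_i j 0
    let v := max (max v0 (PySem.List.pyGetD row_im1 j 0)) (PySem.List.pyGetD row_i (j - 1) 0)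
    PySem.List.pySetD dp ii (PySem.List.pySetD row_i j v)) dp

theorem A_eq (S1 S2 : String) (K : Int) :
    max_common_subsequence_length S1 S2 K =
      PySem.List.pyGetD (PySem.List.pyGetD
        ((PySem.List.pyRange 1 ((S1.toList.length : Int) + 1) 1).foldl
          (fun dp i => ainner K S1.toList S2.toList i dp 1)
          ((PySem.List.pyRange 0 ((S1.toList.length : Int) + 1) 1).map
            (fun _ => List.replicate ((S2.toList.length : Int) + 1).toNat 0)))
        (S1.toList.length : Int) []) (S2.toList.length : Int) 0 := rfl

-- A's inner loop from column t = s2.length + 1 - r builds the same row as rowGo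
theorem Afold (K : Int) (s1 s2 : List Char) (i n : Nat) (hi : 1 ≤ i) (hin : i ≤ n)
    (prev : List Int) (hpnn : ∀ x ∈ prev, 0 ≤ x) :
    ∀ (r : Nat), r ≤ s2.length → ∀ (dp : List (List Int)) (cur : List Int) (left : Int),
    dp.length = n + 1 →
    dp.getD (i - 1) [] = prev →
    dp.getD i [] = cur ++ List.replicate r 0 →
    cur.length = s2.length + 1 - r →
    cur.getD (cur.length - 1) 0 = left →
    (ainner K s1 s2 (i : Int) dp ((s2.length + 1 - r : Nat) : Int)).length = n + 1 ∧
    (∀ t' : Nat, t' ≠ i →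
      (ainner K s1 s2 (i : Int) dp ((s2.length + 1 - r : Nat) : Int)).getD t' [] = dp.getD t' []) ∧
    (ainner K s1 s2 (i : Int) dp ((s2.length + 1 - r : Nat) : Int)).getD i [] =
      cur ++ rowGo K ((PySem.List.pyGetD s1 ((i : Int) - 1) ' ').toNat : Int) prev left
        (s2.length + 1 - r) ((s2.map (fun c => (c.toNat : Int))).drop (s2.length - r)) := by
  intro r
  induction r with
  | zero =>
    intro _ dp cur left hdlen hdprev hdrow hclen hlast
    have h0 : ((s2.length + 1 - 0 : Nat) : Int) = (s2.length : Int) + 1 := by omega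
    unfold ainner
    rw [h0, PySem.List.pyRange_one_eq_nil (le_refl _)]
    simp only [List.foldl_nil]
    refine ⟨hdlen, ?_, ?_⟩
    · intro t' _
      trivial
    · rw [hdrow]
      have hd : List.drop (s2.length - 0) (List.map (fun c => ((c.toNat : Int))) s2) = [] := by
        simp
      rw [hd]
      simp [rowGo]
  | succ r ih =>
    intro hrm dp cur left hdlen hdprev hdrow hclen hlast
    have hio : 0 < i := hi
    have hidp : i < dp.length := by omega
    have hclen' : cur.length = s2.length - r := by omega
    have hii : ((i : Nat) : Int) - 1 = ((i - 1 : Nat) : Int) := by omega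
    have htt : ((s2.length - r : Nat) : Int) - 1 = ((s2.length - r - 1 : Nat) : Int) := by omega
    have hcast1 : ((s2.length + 1 - (r + 1) : Nat) : Int) = ((s2.length - r : Nat) : Int) := by omega
    have hcast2 : ((s2.length + 1 - r : Nat) : Int) = ((s2.length - r : Nat) : Int) + 1 := by omega
    unfold ainner
    rw [hcast1, PySem.List.pyRange_one_cons (by omega), List.foldl_cons]
    simp only [hii, htt, PySem.List.pyGetD_natCast, PySem.List.pySetD_natCast]
    rw [hdprev, hdrow]
    have hread0 : (cur ++ List.replicate (r + 1) (0 : Int)).getD (s2.length - r) 0 = 0 := by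
      rw [List.getD_append_right _ _ _ _ (by omega), hclen']
      simp
    have hreadl : (cur ++ List.replicate (r + 1) (0 : Int)).getD (s2.length - r - 1) 0 = left := by
      rw [List.getD_append _ _ _ _ (by omega), ← hlast, hclen']
    rw [hread0, hreadl]
    set a : Int := ((s1.getD (i - 1) ' ').toNat : Int) with hadef
    set pj := prev.getD (s2.length - r) 0 with hpjdef
    set dg := prev.getD (s2.length - r - 1) 0 with hdgdef
    set v : Int := max (max (if |a - ((s2.getD (s2.length - r - 1) ' ').toNat : Int)| ≤ K then dg + 1 else 0) pj) left with hvdef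
    have hset : (cur ++ List.replicate (r + 1) (0 : Int)).set (s2.length - r) v =
        (cur ++ [v]) ++ List.replicate r (0 : Int) := by
      rw [show s2.length - r = cur.length from hclen'.symm]
      simp [List.replicate_succ]
    rw [hset]
    -- apply the induction hypothesis to the updated table
    obtain ⟨iA1, iA2, iA3⟩ := ih (by omega) (dp.set i ((cur ++ [v]) ++ List.replicate r (0 : Int)))
      (cur ++ [v]) v
      (by rw [List.length_set]; exact hdlen)
      (by rw [← hdprev]
          simp [List.getD_eq_getElem?_getD, List.getElem?_set_ne (by omega : i ≠ i - 1)])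
      (by simp [List.getD_eq_getElem?_getD, List.getElem?_set_self hidp, List.append_assoc])
      (by simp [hclen']; omega)
      (by simp)
    unfold ainner at iA1 iA2 iA3
    rw [hcast2] at iA1 iA2 iA3
    simp only [hii, PySem.List.pyGetD_natCast, PySem.List.pySetD_natCast] at iA1 iA2 iA3
    refine ⟨iA1, ?_, ?_⟩
    · intro t' ht'
      rw [iA2 t' ht']
      simp [List.getD_eq_getElem?_getD, List.getElem?_set_ne (fun h => ht' h.symm)]
    · rw [iA3]
      -- unfold one step of rowGo on the other side
      have hlt : s2.length - (r + 1) < (List.map (fun c => ((c.toNat : Int))) s2).length := by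
        simp
        omega
      rw [List.drop_eq_getElem_cons hlt]
      have hsucc : s2.length - (r + 1) + 1 = s2.length - r := by omega
      rw [hsucc]
      have hj1 : s2.length + 1 - (r + 1) = s2.length - r := by omega
      rw [hj1]
      rw [rowGo]
      -- the two step values agree
      have hb : (List.map (fun c => ((c.toNat : Int))) s2)[s2.length - (r + 1)] =
          ((s2.getD (s2.length - r - 1) ' ').toNat : Int) := by
        have hidx : s2.length - (r + 1) = s2.length - r - 1 := by omega
        simp only [List.getElem_map, hidx]
        rw [List.getD_eq_getElem _ _ (by omega)]
      have hpj0 : 0 ≤ pj := getD_nonneg prev hpnn _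
      have hveq : v = (let pj' := prev.getD (s2.length - r) 0
          let v0 := if pj' > left then pj' else left
          if -K ≤ a - (List.map (fun c => ((c.toNat : Int))) s2)[s2.length - (r + 1)] ∧
              a - (List.map (fun c => ((c.toNat : Int))) s2)[s2.length - (r + 1)] ≤ K then
            (let d := prev.getD (s2.length - r - 1) 0 + 1
             if d > v0 then d else v0)
          else v0) := by
        rw [hb, hvdef, ← hpjdef, ← hdgdef]
        dsimp only
        simp only [abs_le]
        split_ifs <;> simp [max_def] <;> omega
      rw [← hveq]
      rw [show s2.length + 1 - r = s2.length - r + 1 from by omega]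
      simp only [List.append_assoc, List.singleton_append]
      rfl

-- outer loop invariant: A's table row p equals the rowStep fold over the first p characters
theorem outerFold (K : Int) (s1 s2 : List Char) :
    ∀ (p : Nat), p ≤ s1.length →
    ((PySem.List.pyRange 1 ((p : Int) + 1) 1).foldl
        (fun dp i => ainner K s1 s2 i dp 1)
        ((PySem.List.pyRange 0 ((s1.length : Int) + 1) 1).map
          (fun _ => List.replicate ((s2.length : Int) + 1).toNat 0))).length = s1.length + 1 ∧
    (∀ t' : Nat, p < t' → t' ≤ s1.length →
      ((PySem.List.pyRange 1 ((p : Int) + 1) 1).foldl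
        (fun dp i => ainner K s1 s2 i dp 1)
        ((PySem.List.pyRange 0 ((s1.length : Int) + 1) 1).map
          (fun _ => List.replicate ((s2.length : Int) + 1).toNat 0))).getD t' [] =
        List.replicate (s2.length + 1) 0) ∧
    ((PySem.List.pyRange 1 ((p : Int) + 1) 1).foldl
        (fun dp i => ainner K s1 s2 i dp 1)
        ((PySem.List.pyRange 0 ((s1.length : Int) + 1) 1).map
          (fun _ => List.replicate ((s2.length : Int) + 1).toNat 0))).getD p [] =
      ((s1.take p).foldl
        (fun prev c => rowStep K ((c.toNat : Int)) (s2.map (fun c => (c.toNat : Int))) prev)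
        (List.replicate ((s2.map (fun c => (c.toNat : Int))).length + 1) 0)) ∧
    ((s1.take p).foldl
        (fun prev c => rowStep K ((c.toNat : Int)) (s2.map (fun c => (c.toNat : Int))) prev)
        (List.replicate ((s2.map (fun c => (c.toNat : Int))).length + 1) 0)).length = s2.length + 1 ∧
    (∀ x ∈ (s1.take p).foldl
        (fun prev c => rowStep K ((c.toNat : Int)) (s2.map (fun c => (c.toNat : Int))) prev)
        (List.replicate ((s2.map (fun c => (c.toNat : Int))).length + 1) 0), 0 ≤ x) := by
  have hdp0 : ∀ t' : Nat, t' ≤ s1.length →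
      ((PySem.List.pyRange 0 ((s1.length : Int) + 1) 1).map
        (fun _ => List.replicate ((s2.length : Int) + 1).toNat (0 : Int))).getD t' [] =
      List.replicate (s2.length + 1) (0 : Int) := by
    intro t' ht
    rw [List.getD_eq_getElem _ _ (by
      rw [List.length_map, PySem.List.length_pyRange_one]; omega)]
    have hcast : ((s2.length : Int) + 1).toNat = s2.length + 1 := by omega
    rw [List.getElem_map, hcast]
  have hdp0len : ((PySem.List.pyRange 0 ((s1.length : Int) + 1) 1).map
      (fun _ => List.replicate ((s2.length : Int) + 1).toNat (0 : Int))).length = s1.length + 1 := by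
    rw [List.length_map, PySem.List.length_pyRange_one]; omega
  intro p
  induction p with
  | zero =>
    intro _
    have hr : PySem.List.pyRange 1 (((0 : Nat) : Int) + 1) 1 = ([] : List Int) := by
      exact PySem.List.pyRange_one_eq_nil (by norm_num)
    rw [hr]
    simp only [List.foldl_nil, List.take_zero]
    refine ⟨hdp0len, fun t' _ ht => hdp0 t' ht, ?_, ?_, ?_⟩
    · rw [hdp0 0 (by omega)]
      simp
    · simp
    · intro x hx
      rw [List.mem_replicate] at hx
      omega
  | succ p ih =>
    intro hp
    have hpn : p < s1.length := by omega
    obtain ⟨h1, h2, h3, h4, h5⟩ := ih (by omega)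
    -- split the outer range at its last element
    have hr : PySem.List.pyRange 1 (((p + 1 : Nat) : Int) + 1) 1 =
        PySem.List.pyRange 1 ((p : Int) + 1) 1 ++ [(p : Int) + 1] := by
      have h := PySem.List.pyRange_one_succ_right (a := 1) (b := (p : Int) + 1) (by omega)
      have hc : (((p + 1 : Nat) : Int) + 1) = ((p : Int) + 1) + 1 := by omega
      rw [hc, h]
    rw [hr, List.foldl_append]
    -- split B's prefix at its last character
    have ht : s1.take (p + 1) = s1.take p ++ [s1[p]] := by
      rw [List.take_add_one, List.getElem?_eq_getElem hpn]
      rfl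
    rw [ht, List.foldl_append]
    simp only [List.foldl_cons, List.foldl_nil]
    -- the last outer step, via Afold with i = p+1, r = s2.length
    have hrow_i : (List.foldl (fun dp i => ainner K s1 s2 i dp 1)
        ((PySem.List.pyRange 0 ((s1.length : Int) + 1) 1).map
          (fun _ => List.replicate ((s2.length : Int) + 1).toNat (0 : Int)))
        (PySem.List.pyRange 1 ((p : Int) + 1) 1)).getD (p + 1) [] =
        [0] ++ List.replicate s2.length (0 : Int) := by
      rw [h2 (p + 1) (by omega) (by omega)]
      simp [List.replicate_succ]
    have hAf := Afold K s1 s2 (p + 1) s1.length (by omega) (by omega) _ h5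
      s2.length le_rfl _ [0] 0 h1 (by simpa using h3) hrow_i (by simp) (by simp)
    have htn : ((s2.length + 1 - s2.length : Nat) : Int) = 1 := by omega
    have hc2 : (((p + 1 : Nat)) : Int) = (p : Int) + 1 := by omega
    rw [htn, hc2] at hAf
    obtain ⟨hA1, hA2, hA3⟩ := hAf
    refine ⟨hA1, ?_, ?_, ?_, ?_⟩
    · intro t' h1' h2'
      rw [hA2 t' (by omega), h2 t' (by omega) h2']
    · rw [hA3]
      have ha : PySem.List.pyGetD s1 (((p : Int) + 1) - 1) ' ' = s1[p] := by
        have : (((p : Int) + 1) - 1) = ((p : Nat) : Int) := by omega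
        rw [this, PySem.List.pyGetD_natCast, List.getD_eq_getElem _ _ hpn]
      rw [ha]
      have hdrop : (s2.map (fun c => (c.toNat : Int))).drop (s2.length - s2.length) =
          s2.map (fun c => (c.toNat : Int)) := by simp
      rw [hdrop]
      have h1n : s2.length + 1 - s2.length = 1 := by omega
      rw [h1n]
      rfl
    · rw [rowStep]
      simp [rowGo_length]
    · intro x hx
      rw [rowStep] at hx
      rcases List.mem_cons.mp hx with h | h
      · omega
      · exact rowGo_nonneg K _ _ h5 _ 0 1 le_rfl x h

-- ========== B-side: thresholds ==========

-- the DP row recurrence as a function of the column index (j is the 1-based column)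
def rowRec (K a : Int) (o2 prev : List Int) : Nat → Int
  | 0 => 0
  | j + 1 =>
    let left := rowRec K a o2 prev j
    let pj := prev.getD (j + 1) 0
    let v0 := if pj > left then pj else left
    if -K ≤ a - o2.getD j 0 ∧ a - o2.getD j 0 ≤ K then
      (let d := prev.getD j 0 + 1
       if d > v0 then d else v0)
    else v0

-- rowGo computes rowRec pointwise
theorem rowGo_getD_rowRec (K a : Int) (o2 prev : List Int) :
    ∀ (bs : List Int) (j : Nat), o2.drop j = bs →
    ∀ t, t < bs.length →
    (rowGo K a prev (rowRec K a o2 prev j) (j + 1) bs).getD t 0 = rowRec K a o2 prev (j + 1 + t) := by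
  intro bs
  induction bs with
  | nil => intro j _ t ht; simp at ht
  | cons b bs ih =>
    intro j hdrop t ht
    have hlt : j < o2.length := by
      by_contra hc
      rw [List.drop_eq_nil_of_le (by omega)] at hdrop
      simp at hdrop
    have hcons := List.drop_eq_getElem_cons hlt
    rw [hdrop] at hcons
    injection hcons with hbe hdrop'
    have hb : o2.getD j 0 = b := by
      rw [List.getD_eq_getElem _ _ hlt, ← hbe]
    have hdrop' : o2.drop (j + 1) = bs := hdrop'.symm
    have hv : (let pj := prev.getD (j + 1) 0
        let v0 := if pj > rowRec K a o2 prev j then pj else rowRec K a o2 prev j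
        if -K ≤ a - b ∧ a - b ≤ K then
          (let d := prev.getD ((j + 1) - 1) 0 + 1
           if d > v0 then d else v0)
        else v0) = rowRec K a o2 prev (j + 1) := by
      rw [rowRec]
      simp only [hb, Nat.add_sub_cancel]
    cases t with
    | zero =>
      rw [rowGo]
      simpa using hv
    | succ t =>
      rw [rowGo]
      simp only [List.getD_cons_succ]
      have := ih (j + 1) hdrop' t (by simpa using ht)
      rw [hv]
      rw [this]
      congr 1
      omega

theorem rowStep_getD (K a : Int) (o2 prev : List Int) :
    ∀ t, t ≤ o2.length → (rowStep K a o2 prev).getD t 0 = rowRec K a o2 prev t := by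
  intro t htm
  cases t with
  | zero => rfl
  | succ t =>
    rw [rowStep, List.getD_cons_succ]
    have h := rowGo_getD_rowRec K a o2 prev o2 0 rfl t (by omega)
    rw [show rowRec K a o2 prev 0 = 0 from rfl] at h
    rw [h]
    congr 1
    omega

-- "a valid DP row": starts at 0, nondecreasing, steps of at most 1
def GoodR (m : Nat) (r : Nat → Int) : Prop :=
  r 0 = 0 ∧ ∀ j, j < m → (r j ≤ r (j + 1) ∧ r (j + 1) ≤ r j + 1)

theorem GoodR_nonneg {m : Nat} {r : Nat → Int} (hg : GoodR m r) :
    ∀ j, j ≤ m → 0 ≤ r j := by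
  intro j
  induction j with
  | zero => intro _; have := hg.1; omega
  | succ j ih => intro h; have := hg.2 j (by omega); have := ih (by omega); omega

theorem GoodR_mono {m : Nat} {r : Nat → Int} (hg : GoodR m r) :
    ∀ j j', j ≤ j' → j' ≤ m → r j ≤ r j' := by
  intro j j' hle hm
  induction j' with
  | zero => have : j = 0 := by omega
            rw [this]
  | succ j' ih =>
    rcases Nat.lt_or_ge j (j' + 1) with hlt | hge
    · have h1 := (hg.2 j' (by omega)).1
      have h2 := ih (by omega) (by omega)
      omega
    · have : j = j' + 1 := by omega
      rw [this]

theorem rowRec_left_le (K a : Int) (o2 prev : List Int) (j : Nat) :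
    rowRec K a o2 prev j ≤ rowRec K a o2 prev (j + 1) := by
  rw [rowRec]
  dsimp only
  split_ifs <;> omega

theorem rowRec_ge_prev (K a : Int) (o2 prev : List Int) (h0 : prev.getD 0 0 = 0) (j : Nat) :
    prev.getD j 0 ≤ rowRec K a o2 prev j := by
  cases j with
  | zero => rw [h0]; rfl
  | succ j =>
    rw [rowRec]
    dsimp only
    split_ifs <;> omega

theorem rowRec_le_prev_add (K a : Int) (o2 prev : List Int)
    (hg : GoodR o2.length (fun j => prev.getD j 0)) :
    ∀ j, j ≤ o2.length → rowRec K a o2 prev j ≤ prev.getD j 0 + 1 := by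
  intro j
  induction j with
  | zero => intro _; rw [rowRec]; have := hg.1; simp only at this; omega
  | succ j ih =>
    intro h
    have hstep := hg.2 j (by omega)
    simp only at hstep
    have hih := ih (by omega)
    rw [rowRec]
    dsimp only
    split_ifs <;> omega

theorem GoodR_rowRec (K a : Int) (o2 prev : List Int)
    (hg : GoodR o2.length (fun j => prev.getD j 0)) :
    GoodR o2.length (rowRec K a o2 prev) := by
  refine ⟨rfl, ?_⟩
  intro j hj
  refine ⟨rowRec_left_le K a o2 prev j, ?_⟩
  have hge := rowRec_ge_prev K a o2 prev hg.1 j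
  have hstep := hg.2 j hj
  simp only at hstep
  rw [rowRec]
  dsimp only
  split_ifs <;> omega

-- the near-match test at 1-based column j
def mtc (K a : Int) (o2 : List Int) (j : Nat) : Prop :=
  -K ≤ a - o2.getD (j - 1) 0 ∧ a - o2.getD (j - 1) 0 ≤ K

-- characterization: the new row reaches kk at column j iff the old row did, or some
-- near-matching column j' ≤ j has old value ≥ kk - 1 left of it
theorem rowRec_char (K a : Int) (o2 prev : List Int)
    (hg : GoodR o2.length (fun j => prev.getD j 0)) :
    ∀ j, j ≤ o2.length → ∀ kk : Int, 1 ≤ kk →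
    (kk ≤ rowRec K a o2 prev j ↔
      kk ≤ prev.getD j 0 ∨
      ∃ j', 1 ≤ j' ∧ j' ≤ j ∧ mtc K a o2 j' ∧ kk - 1 ≤ prev.getD (j' - 1) 0) := by
  intro j
  induction j with
  | zero =>
    intro _ kk hkk
    have h0 := hg.1
    simp only at h0
    simp only [rowRec]
    constructor
    · intro h; exact absurd h (by omega)
    · rintro (h | ⟨j', hj1, hj2, _, _⟩)
      · rw [h0] at h; omega
      · omega
  | succ j ih =>
    intro hjm kk hkk
    have hstep := hg.2 j (by omega)
    simp only at hstep
    have hih := ih (by omega) kk hkk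
    have hval : (kk ≤ rowRec K a o2 prev (j + 1)) ↔
        (((-K ≤ a - o2.getD j 0 ∧ a - o2.getD j 0 ≤ K) ∧ kk ≤ prev.getD j 0 + 1) ∨
          kk ≤ prev.getD (j + 1) 0 ∨ kk ≤ rowRec K a o2 prev j) := by
      rw [rowRec]
      dsimp only
      by_cases hm : -K ≤ a - o2.getD j 0 ∧ a - o2.getD j 0 ≤ K
      · rw [if_pos hm]
        simp only [hm, true_and]
        split_ifs <;> omega
      · rw [if_neg hm]
        simp only [hm, false_and, false_or]
        split_ifs <;> omega
    rw [hval]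
    constructor
    · rintro (⟨hm, hd⟩ | hpj | hleft)
      · right
        refine ⟨j + 1, by omega, le_refl _, ?_, ?_⟩
        · simpa [mtc] using hm
        · simpa using (by omega : kk - 1 ≤ prev.getD j 0)
      · left; exact hpj
      · rcases hih.mp hleft with h2 | ⟨j', p1, p2, p3, p4⟩
        · left; omega
        · right; exact ⟨j', p1, by omega, p3, p4⟩
    · rintro (h | ⟨j', p1, p2, p3, p4⟩)
      · right; left; exact h
      · rcases Nat.lt_or_ge j' (j + 1) with hlt | hge
        · right; right
          exact hih.mpr (Or.inr ⟨j', p1, by omega, p3, p4⟩)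
        · have hj' : j' = j + 1 := by omega
          subst hj'
          left
          constructor
          · simpa [mtc] using p3
          · simpa using p4
          
-- first-match characterization of the scan 'for j in range(lo, b): if p(j): break'
theorem scanFirstAux {p : Int → Bool} :
    ∀ (n : Nat) (lo b : Int), (b - lo).toNat = n →
    ∀ {j : Int}, (PySem.List.pyRange lo b 1).find? p = some j →
    lo ≤ j ∧ j < b ∧ p j = true ∧ ∀ i, lo ≤ i → i < j → p i = false := by
  intro n
  induction n with
  | zero =>
    intro lo b hn j hf
    rw [PySem.List.pyRange_one_eq_nil (by omega)] at hf
    simp at hf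
  | succ n ih =>
    intro lo b hn j hf
    rw [PySem.List.pyRange_one_cons (by omega)] at hf
    by_cases hp : p lo = true
    · rw [List.find?_cons_of_pos hp] at hf
      injection hf with hf
      subst hf
      exact ⟨le_refl _, by omega, hp, fun i h1 h2 => absurd h1 (by omega)⟩
    · have hp' : p lo = false := by simpa using hp
      rw [List.find?_cons_of_neg (by simp [hp'])] at hf
      obtain ⟨h1, h2, h3, h4⟩ := ih (lo + 1) b (by omega) hf
      refine ⟨by omega, h2, h3, ?_⟩
      intro i hi1 hi2
      rcases eq_or_lt_of_le hi1 with he | hlt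
      · rw [← he]; exact hp'
      · exact h4 i (by omega) hi2

theorem scanFirst {p : Int → Bool} {lo b j : Int}
    (hf : (PySem.List.pyRange lo b 1).find? p = some j) :
    lo ≤ j ∧ j < b ∧ p j = true ∧ ∀ i, lo ≤ i → i < j → p i = false :=
  scanFirstAux (b - lo).toNat lo b rfl hf

theorem scanNone {p : Int → Bool} {lo b : Int}
    (h : (PySem.List.pyRange lo b 1).find? p = none) :
    ∀ i, lo ≤ i → i < b → p i = false := by
  intro i h1 h2
  have := List.find?_eq_none.mp h i (PySem.List.mem_pyRange_one.mpr ⟨h1, h2⟩)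
  simpa using this

-- the port's scan predicate
def P (K a : Int) (o2 : List Int) : Int → Bool :=
  fun j => decide (-K ≤ a - PySem.List.pyGetD o2 (j - 1) 0 ∧ a - PySem.List.pyGetD o2 (j - 1) 0 ≤ K)

theorem P_eq (K a : Int) (o2 : List Int) {j : Int} (hj : 1 ≤ j) :
    (P K a o2 j = true) ↔ mtc K a o2 j.toNat := by
  have h1 : PySem.List.pyGetD o2 (j - 1) 0 = o2.getD (j - 1).toNat 0 := by
    rw [PySem.List.pyGetD_of_nonneg]
    omega
  have h2 : (j - 1).toNat = j.toNat - 1 := by omega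
  simp [P, mtc, h1, h2]

-- one update of the threshold list (the body of B's outer loop)
def bstep (K : Int) (o2 : List Int) (a : Int) (th : List Int) : List Int :=
  let st := th.foldl (fun (st : List Int × Int) hi =>
      (st.1 ++ [((PySem.List.pyRange (st.2 + 1) hi 1).find? (P K a o2)).getD hi], hi))
    (([] : List Int), (0 : Int))
  match (PySem.List.pyRange (st.2 + 1) ((o2.length : Int) + 1) 1).find? (P K a o2) with
  | some j => st.1 ++ [j]
  | none => st.1

-- the list of updated thresholds produced by B's inner loop
def newTs (K a : Int) (o2 : List Int) : Int → List Int → List Int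
  | _, [] => []
  | lo, hi :: rest =>
      (((PySem.List.pyRange (lo + 1) hi 1).find? (P K a o2)).getD hi) :: newTs K a o2 hi rest

theorem bfold_eq (K a : Int) (o2 : List Int) : ∀ (rest acc : List Int) (lo : Int),
    rest.foldl (fun (st : List Int × Int) hi =>
        (st.1 ++ [((PySem.List.pyRange (st.2 + 1) hi 1).find? (P K a o2)).getD hi], hi)) (acc, lo)
    = (acc ++ newTs K a o2 lo rest, rest.getLastD lo) := by
  intro rest
  induction rest with
  | nil => intro acc lo; simp [newTs]
  | cons hi rest ih =>
    intro acc lo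
    rw [List.foldl_cons, ih, List.getLastD_cons]
    simp [newTs]

theorem newTs_length (K a : Int) (o2 : List Int) :
    ∀ (th : List Int) (lo : Int), (newTs K a o2 lo th).length = th.length := by
  intro th
  induction th with
  | nil => intro lo; rfl
  | cons hi rest ih => intro lo; simp [newTs, ih]

theorem newTs_getD (K a : Int) (o2 : List Int) :
    ∀ (th : List Int) (lo : Int) (k : Nat), k < th.length →
    (newTs K a o2 lo th).getD k 0 =
      ((PySem.List.pyRange ((if k = 0 then lo else th.getD (k - 1) 0) + 1) (th.getD k 0) 1).find?
        (P K a o2)).getD (th.getD k 0) := by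
  intro th
  induction th with
  | nil => intro lo k hk; simp at hk
  | cons hi rest ih =>
    intro lo k hk
    cases k with
    | zero => simp [newTs]
    | succ k =>
      rw [newTs]
      simp only [List.getD_cons_succ]
      rw [ih hi k (by simpa using hk)]
      cases k with
      | zero => simp
      | succ k => simp

theorem getLastD_eq (l : List Int) (d : Int) :
    l.getLastD d = if l.length = 0 then d else l.getD (l.length - 1) d := by
  induction l generalizing d with
  | nil => rfl
  | cons x l ih =>
    rw [List.getLastD_cons, ih x]
    cases l with
    | nil => rfl
    | cons y l' =>
      simp only [List.length_cons, Nat.succ_ne_zero, if_false, Nat.succ_sub_one]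
      rw [List.getD_cons_succ]
      rw [List.getD_eq_getElem _ _ (by simp), List.getD_eq_getElem _ _ (by simp)]

-- the threshold invariant: th has one entry per achievable length, and entry k is the least
-- 1-based column j at which the row value reaches k+1
def ThInvF (m : Nat) (r : Nat → Int) (th : List Int) : Prop :=
  th.length = (r m).toNat ∧
  ∀ k, k < th.length → ∀ j, j ≤ m → (((k : Int) + 1 ≤ r j) ↔ th.getD k 0 ≤ (j : Int))

theorem core_scan (K a : Int) (o2 prev : List Int)
    (hg : GoodR o2.length (fun j => prev.getD j 0))
    (k : Nat) (lo B : Int) (hlo : 0 ≤ lo) (hB : B ≤ (o2.length : Int) + 1)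
    (hPlo : ∀ j' : Nat, 1 ≤ j' → j' ≤ o2.length →
      (((k : Int) ≤ prev.getD (j' - 1) 0) ↔ lo < (j' : Int)))
    (hPhi : ∀ j : Nat, j ≤ o2.length → (((k : Int) + 1 ≤ prev.getD j 0) ↔ B ≤ (j : Int))) :
    ∀ j : Nat, j ≤ o2.length →
      (((k : Int) + 1 ≤ rowRec K a o2 prev j) ↔
        (((PySem.List.pyRange (lo + 1) B 1).find? (P K a o2)).getD B ≤ (j : Int))) := by
  intro j hj
  have hchar := rowRec_char K a o2 prev hg j hj ((k : Int) + 1) (by omega)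
  rw [hchar]
  cases hf : (PySem.List.pyRange (lo + 1) B 1).find? (P K a o2) with
  | none =>
    have hnone := scanNone hf
    simp only [Option.getD_none]
    constructor
    · rintro (h | ⟨j', p1, p2, p3, p4⟩)
      · exact (hPhi j hj).mp h
      · have hj'm : j' ≤ o2.length := le_trans p2 hj
        have hlo' : lo < (j' : Int) := (hPlo j' p1 hj'm).mp (by omega)
        by_contra hc
        push Not at hc
        have hPt : P K a o2 (j' : Int) = true := by
          rw [P_eq K a o2 (by omega : (1:Int) ≤ (j' : Int))]
          simpa using p3
        have hPfalse := hnone (j' : Int) (by omega) (by omega)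
        rw [hPfalse] at hPt
        exact Bool.noConfusion hPt
    · intro h
      left
      exact (hPhi j hj).mpr h
  | some j0 =>
    obtain ⟨hs1, hs2, hs3, hs4⟩ := scanFirst hf
    simp only [Option.getD_some]
    constructor
    · rintro (h | ⟨j', p1, p2, p3, p4⟩)
      · have := (hPhi j hj).mp h
        omega
      · have hj'm : j' ≤ o2.length := le_trans p2 hj
        have hlo' : lo < (j' : Int) := (hPlo j' p1 hj'm).mp (by omega)
        by_contra hc
        push Not at hc
        have hPt : P K a o2 (j' : Int) = true := by
          rw [P_eq K a o2 (by omega : (1:Int) ≤ (j' : Int))]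
          simpa using p3
        have hPfalse := hs4 (j' : Int) (by omega) (by omega)
        rw [hPfalse] at hPt
        exact Bool.noConfusion hPt
    · intro h
      right
      refine ⟨j0.toNat, by omega, by omega, ?_, ?_⟩
      · have := (P_eq K a o2 (by omega : (1:Int) ≤ j0)).mp hs3
        exact this
      · have := (hPlo j0.toNat (by omega) (by omega)).mpr (by omega)
        omega

theorem step_inv (K a : Int) (o2 prev th : List Int)
    (hg : GoodR o2.length (fun j => prev.getD j 0))
    (hinv : ThInvF o2.length (fun j => prev.getD j 0) th) :
    ThInvF o2.length (rowRec K a o2 prev) (bstep K o2 a th) := by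
  have hlen : th.length = (prev.getD o2.length 0).toNat := hinv.1
  have hiff : ∀ k, k < th.length → ∀ j, j ≤ o2.length →
      (((k : Int) + 1 ≤ prev.getD j 0) ↔ th.getD k 0 ≤ (j : Int)) := hinv.2
  have hr0 : prev.getD 0 0 = 0 := hg.1
  have hrm_nn : 0 ≤ prev.getD o2.length 0 := GoodR_nonneg hg o2.length le_rfl
  have hrm : prev.getD o2.length 0 = (th.length : Int) := by
    rw [hlen, Int.toNat_of_nonneg hrm_nn]
  have hpos : ∀ k, k < th.length → 1 ≤ th.getD k 0 := by
    intro k hk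
    by_contra hc
    push Not at hc
    have h := (hiff k hk 0 (by omega)).mpr (by
      simpa using (by omega : th.getD k 0 ≤ ((0 : Nat) : Int)))
    rw [hr0] at h
    omega
  have hle_m : ∀ k, k < th.length → th.getD k 0 ≤ (o2.length : Int) := by
    intro k hk
    refine (hiff k hk o2.length le_rfl).mp ?_
    rw [hrm]
    omega
  have hPlo : ∀ k : Nat, k ≤ th.length → ∀ j' : Nat, 1 ≤ j' → j' ≤ o2.length →
      (((k : Int) ≤ prev.getD (j' - 1) 0) ↔
        (if k = 0 then (0 : Int) else th.getD (k - 1) 0) < (j' : Int)) := by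
    intro k hk j' h1 h2
    cases k with
    | zero =>
      rw [if_pos rfl]
      have hnn : 0 ≤ prev.getD (j' - 1) 0 := GoodR_nonneg hg (j' - 1) (by omega)
      constructor
      · intro _; omega
      · intro _; simpa using hnn
    | succ k =>
      rw [if_neg (Nat.succ_ne_zero k)]
      have hii := hiff k (by omega) (j' - 1) (by omega)
      have hc : ((j' - 1 : Nat) : Int) = (j' : Int) - 1 := by omega
      rw [hc] at hii
      have hcast : ((k + 1 : Nat) : Int) = (k : Int) + 1 := by push_cast; ring
      rw [hcast, Nat.succ_sub_one]
      omega
  -- unfold bstep: inner loop = newTs, entering lo of the extension scan = last old threshold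
  have hst := bfold_eq K a o2 th [] 0
  have hbu : bstep K o2 a th =
      (match (PySem.List.pyRange ((if th.length = 0 then (0:Int) else th.getD (th.length - 1) 0) + 1)
          ((o2.length : Int) + 1) 1).find? (P K a o2) with
        | some j => newTs K a o2 0 th ++ [j]
        | none => newTs K a o2 0 th) := by
    unfold bstep
    rw [hst]
    simp only [List.nil_append, getLastD_eq]
  -- per-entry characterization for the kept entries
  have hcore : ∀ k : Nat, k < th.length → ∀ j : Nat, j ≤ o2.length →
      (((k : Int) + 1 ≤ rowRec K a o2 prev j) ↔ (newTs K a o2 0 th).getD k 0 ≤ (j : Int)) := by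
    intro k hk j hj
    rw [newTs_getD K a o2 th 0 k hk]
    refine core_scan K a o2 prev hg k _ _ ?_ ?_ (hPlo k (by omega)) (hiff k hk) j hj
    · split_ifs with h
      · omega
      · have := hpos (k - 1) (by omega)
        omega
    · have := hle_m k hk
      omega
  -- the extension scan
  have hPhiT : ∀ j : Nat, j ≤ o2.length →
      (((th.length : Int) + 1 ≤ prev.getD j 0) ↔ ((o2.length : Int) + 1 ≤ (j : Int))) := by
    intro j hj
    have hmono := GoodR_mono hg j o2.length hj le_rfl
    simp only at hmono
    constructor
    · intro h; rw [hrm] at hmono; omega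
    · intro h; omega
  have hcoreT : ∀ j : Nat, j ≤ o2.length →
      (((th.length : Int) + 1 ≤ rowRec K a o2 prev j) ↔
        (((PySem.List.pyRange ((if th.length = 0 then (0:Int) else th.getD (th.length - 1) 0) + 1)
            ((o2.length : Int) + 1) 1).find? (P K a o2)).getD ((o2.length : Int) + 1) ≤ (j : Int))) := by
    intro j hj
    refine core_scan K a o2 prev hg th.length _ _ ?_ (le_refl _) (hPlo th.length le_rfl) hPhiT j hj
    split_ifs with h
    · omega
    · have := hpos (th.length - 1) (by omega)
      omega
  have hup : rowRec K a o2 prev o2.length ≤ (th.length : Int) + 1 := by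
    have := rowRec_le_prev_add K a o2 prev hg o2.length le_rfl
    omega
  have hdom : (th.length : Int) ≤ rowRec K a o2 prev o2.length := by
    have := rowRec_ge_prev K a o2 prev hr0 o2.length
    omega
  rw [hbu]
  cases hf : (PySem.List.pyRange ((if th.length = 0 then (0:Int) else th.getD (th.length - 1) 0) + 1)
      ((o2.length : Int) + 1) 1).find? (P K a o2) with
  | some j0 =>
    obtain ⟨hs1, hs2, _, _⟩ := scanFirst hf
    have hTm : (th.length : Int) + 1 ≤ rowRec K a o2 prev o2.length := by
      have h := hcoreT o2.length le_rfl
      rw [hf] at h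
      simp only [Option.getD_some] at h
      exact h.mpr (by omega)
    have hre : rowRec K a o2 prev o2.length = (th.length : Int) + 1 := le_antisymm hup hTm
    constructor
    · rw [List.length_append, newTs_length, List.length_singleton, hre]
      omega
    · intro k hk j hj
      rw [List.length_append, newTs_length, List.length_singleton] at hk
      rcases Nat.lt_or_ge k th.length with hkT | hkT
      · rw [List.getD_append _ _ _ _ (by rw [newTs_length]; omega)]
        exact hcore k hkT j hj
      · have hkT' : k = th.length := by omega
        subst hkT'
        rw [List.getD_append_right _ _ _ _ (by rw [newTs_length])]
        rw [newTs_length]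
        simp only [Nat.sub_self, List.getD_cons_zero]
        have h := hcoreT j hj
        rw [hf] at h
        simpa using h
  | none =>
    have hTe : rowRec K a o2 prev o2.length = (th.length : Int) := by
      have h := hcoreT o2.length le_rfl
      rw [hf] at h
      simp only [Option.getD_none] at h
      have hnot : ¬ ((th.length : Int) + 1 ≤ rowRec K a o2 prev o2.length) := by
        intro hcon
        have := h.mp hcon
        omega
      omega
    constructor
    · rw [newTs_length, hTe]
      omega
    · intro k hk j hj
      rw [newTs_length] at hk
      exact hcore k hk j hj

theorem GoodR_congr {m : Nat} {r r' : Nat → Int} (h : ∀ j, j ≤ m → r j = r' j)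
    (hg : GoodR m r) : GoodR m r' := by
  refine ⟨by rw [← h 0 (by omega)]; exact hg.1, ?_⟩
  intro j hj
  rw [← h j (by omega), ← h (j + 1) (by omega)]
  exact hg.2 j hj

theorem ThInvF_congr {m : Nat} {r r' : Nat → Int} {th : List Int}
    (h : ∀ j, j ≤ m → r j = r' j) (hi : ThInvF m r th) : ThInvF m r' th := by
  refine ⟨by rw [← h m le_rfl]; exact hi.1, ?_⟩
  intro k hk j hj
  rw [← h j hj]
  exact hi.2 k hk j hj

theorem fold_inv (K : Int) (o2 : List Int) :
    ∀ (cs : List Char) (prev th : List Int),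
    GoodR o2.length (fun j => prev.getD j 0) →
    ThInvF o2.length (fun j => prev.getD j 0) th →
    GoodR o2.length (fun j =>
      (cs.foldl (fun prev c => rowStep K ((c.toNat : Int)) o2 prev) prev).getD j 0) ∧
    ThInvF o2.length (fun j =>
      (cs.foldl (fun prev c => rowStep K ((c.toNat : Int)) o2 prev) prev).getD j 0)
      (cs.foldl (fun th c => bstep K o2 ((c.toNat : Int)) th) th) := by
  intro cs
  induction cs with
  | nil => intro prev th hg hi; exact ⟨hg, hi⟩
  | cons c cs ih =>
    intro prev th hg hi
    simp only [List.foldl_cons]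
    have hpt : ∀ j, j ≤ o2.length →
        rowRec K (c.toNat : Int) o2 prev j = (rowStep K (c.toNat : Int) o2 prev).getD j 0 := by
      intro j hj
      rw [rowStep_getD K _ o2 prev j hj]
    exact ih (rowStep K (c.toNat : Int) o2 prev) (bstep K o2 (c.toNat : Int) th)
      (GoodR_congr hpt (GoodR_rowRec K _ o2 prev hg))
      (ThInvF_congr hpt (step_inv K _ o2 prev th hg hi))

theorem replicate_getD_zero (n : Nat) (j : Nat) : (List.replicate n (0 : Int)).getD j 0 = 0 := by
  rcases Nat.lt_or_ge j n with h | h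
  · rw [List.getD_eq_getElem _ _ (by simpa using h)]
    simp
  · rw [List.getD_eq_default _ _ (by simpa using h)]

theorem B_eq (S1 S2 : String) (K : Int) :
    max_common_subsequence_length_alt S1 S2 K =
      ((S1.toList.foldl
        (fun th c => bstep K (S2.toList.map (fun c => (c.toNat : Int))) ((c.toNat : Int)) th)
        []).length : Int) := rfl

-- ===== VERDICT (by name: the statement is the Claim_ definition above) =====
theorem max_common_subsequence_length_spec : Claim_equal_max_common_subsequence_length := by
  intro S1 S2 K _
  unfold Spec_max_common_subsequence_length
  rw [A_eq]
  obtain ⟨hlen, _, hrow, hblen, _⟩ := outerFold K S1.toList S2.toList S1.toList.length le_rfl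
  rw [List.take_length] at hrow hblen
  simp only [PySem.List.pyGetD_natCast]
  rw [hrow, B_eq]
  set o2 : List Int := S2.toList.map (fun c => (c.toNat : Int)) with ho2
  have hm : o2.length = S2.toList.length := by rw [ho2]; simp
  have hinit_g : GoodR o2.length (fun j => (List.replicate (o2.length + 1) (0 : Int)).getD j 0) := by
    refine ⟨replicate_getD_zero _ _, ?_⟩
    intro j hj
    constructor
    · show (List.replicate (o2.length + 1) (0 : Int)).getD j 0 ≤
        (List.replicate (o2.length + 1) (0 : Int)).getD (j + 1) 0
      rw [replicate_getD_zero, replicate_getD_zero]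
    · show (List.replicate (o2.length + 1) (0 : Int)).getD (j + 1) 0 ≤
        (List.replicate (o2.length + 1) (0 : Int)).getD j 0 + 1
      rw [replicate_getD_zero, replicate_getD_zero]
      omega
  have hinit_t : ThInvF o2.length (fun j => (List.replicate (o2.length + 1) (0 : Int)).getD j 0) [] := by
    constructor
    · show ([] : List Int).length =
        ((List.replicate (o2.length + 1) (0 : Int)).getD o2.length 0).toNat
      rw [replicate_getD_zero]
      rfl
    · intro k hk
      simp at hk
  obtain ⟨hgood, hthinv⟩ :=
    fold_inv K o2 S1.toList (List.replicate (o2.length + 1) 0) [] hinit_g hinit_t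
  have h1 : (S1.toList.foldl (fun th c => bstep K o2 ((c.toNat : Int)) th) []).length =
      ((S1.toList.foldl (fun prev c => rowStep K ((c.toNat : Int)) o2 prev)
        (List.replicate (o2.length + 1) 0)).getD o2.length 0).toNat := hthinv.1
  have hnn : 0 ≤ (S1.toList.foldl (fun prev c => rowStep K ((c.toNat : Int)) o2 prev)
      (List.replicate (o2.length + 1) 0)).getD o2.length 0 := GoodR_nonneg hgood o2.length le_rfl
  rw [← hm, h1, Int.toNat_of_nonneg hnn]
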